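-- pv_equiv track=rewrite | github.com/cjbohlman/snake-containment | src/snake_containment/core/secrets.py | _truncate_code_snippet
-- ===== SOURCE A (Python) =====
-- def _truncate_code_snippet(code: str, max_length: int = 100) -> str:
--     """Intelligently truncate code snippets for display"""
--     if not code:
--         return ""
--
--     # If it's short enough, return as-is
--     if len(code) <= max_length:
--         return code
--
--     # For very long lines (likely minified), show context around secrets
--     # Try to find where the actual secret might be
--     truncated = code[:max_length]
--
--     # If we're in the middle of a word/token, try to end at a reasonable boundary
--     if max_length < len(code):
--         # Look for natural break points near the end
--         for boundary in [' ', '"', "'", '=', ':', ';', ',', ')', '}', ']']: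
--             last_boundary = truncated.rfind(boundary)
--             if last_boundary > max_length - 20:  # Within 20 chars of the end
--                 truncated = code[:last_boundary + 1]
--                 break
--
--     return truncated + "..." if len(code) > len(truncated) else truncated
-- ===== SOURCE B (Python) =====
-- _BOUNDARY_RANK = {ch: r for r, ch in enumerate(" \"'=:;,)}]")}
--
--
-- def _truncate_code_snippet(code: str, max_length: int = 100) -> str:
--     """Truncate at a nearby natural boundary: a single right-to-left scan of the
--     tail window keeps the best (lowest-priority-rank, position) boundary seen."""
--     if not code:
--         return ""
--     if len(code) <= max_length:
--         return code
--     prefix = code[:max_length]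
--     threshold = max_length - 20
--     best_rank = len(_BOUNDARY_RANK)  # sentinel: no boundary found yet
--     cut = len(prefix)
--     for i in range(len(prefix) - 1, -1, -1):
--         if i <= threshold:
--             break
--         r = _BOUNDARY_RANK.get(prefix[i])
--         if r is not None and r < best_rank:
--             best_rank = r
--             cut = i + 1
--     truncated = code[:cut]
--     return truncated + "..." if len(code) > len(truncated) else truncated
-- ===== Notes on version B (the rewrite author's own statement) =====
-- stated objective: alternative
-- what changed: A scans the whole prefix up to ten times with rfind, once per boundary character in priority order; B makes a single right-to-left pass over the tail window (indices above max_length-20), keeping the best (priority rank, position) boundary in an accumulator and cutting there.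
-- intended difference: On inputs where code is longer than max_length, max_length is at most 18 and the truncated prefix is nonempty but contains no space, the rfind sentinel of A (minus one) passes the near-the-end threshold test, so A truncates the snippet to the empty string and returns only the three-dot ellipsis; B cuts at the best boundary actually present (or keeps the prefix) and returns it followed by the ellipsis, which is the intended truncation. — e.g. on _truncate_code_snippet("abcdef", 3): A returns "...", B returns "abc..."
import Mathlib
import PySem

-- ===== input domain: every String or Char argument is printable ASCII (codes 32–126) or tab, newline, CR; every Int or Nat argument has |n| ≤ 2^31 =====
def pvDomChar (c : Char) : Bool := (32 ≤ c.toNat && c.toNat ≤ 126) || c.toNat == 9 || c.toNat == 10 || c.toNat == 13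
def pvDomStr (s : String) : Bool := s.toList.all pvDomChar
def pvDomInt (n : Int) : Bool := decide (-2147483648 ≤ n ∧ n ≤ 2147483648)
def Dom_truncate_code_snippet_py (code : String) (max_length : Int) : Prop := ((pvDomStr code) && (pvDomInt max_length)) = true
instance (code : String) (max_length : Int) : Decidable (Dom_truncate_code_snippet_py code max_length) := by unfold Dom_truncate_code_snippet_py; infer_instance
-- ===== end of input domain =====

-- B replaces A's ten rfind scans (one per boundary, in priority order) by ONE
-- right-to-left pass over the tail window keeping the best (rank, position)
-- boundary in an accumulator (objective: alternative).

-- ===== PORT A =====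
def pvBoundaries : List String := [" ", "\"", "'", "=", ":", ";", ",", ")", "}", "]"]

-- A's for-loop over the boundary list with break
def pvLoopA (code : String) (max_length : Int) (truncated : String) : List String → String
  | [] => truncated
  | b :: rest =>
      let last_boundary := PySem.Str.rfind truncated b
      if last_boundary > max_length - 20 then
        PySem.Str.slice code none (some (last_boundary + 1))
      else pvLoopA code max_length truncated rest

def truncate_code_snippet_py (code : String) (max_length : Int) : String :=
  if code = "" then ""
  else if PySem.Str.len code ≤ max_length then code
  else
    let truncated := PySem.Str.slice code none (some max_length)
    let truncated :=
      if max_length < PySem.Str.len code then pvLoopA code max_length truncated pvBoundaries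
      else truncated
    if PySem.Str.len code > PySem.Str.len truncated then truncated ++ "..." else truncated

-- ===== PORT B =====
-- _BOUNDARY_RANK = {ch: r for r, ch in enumerate(" \"'=:;,)}]")}
def pvRankChars : List Char := " \"'=:;,)}]".toList
def pvRankDict : PySem.Dict Char Int :=
  (PySem.List.enumerate pvRankChars 0).foldl (fun d p => d.insert p.2 p.1) PySem.Dict.empty

-- body of B's window loop: look up the rank of prefix[i], keep the best (rank, cut)
def pvStepB (st : Int × Int) (pref : List Char) (i : Nat) : Int × Int :=
  match pref[i]? with          -- prefix[i]; i is always in range in B's loop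
  | none => st
  | some c =>
      match pvRankDict.get? c with   -- _BOUNDARY_RANK.get(prefix[i])
      | some r => if r < st.1 then (r, (i : Int) + 1) else st
      | none => st

-- for i in range(len(prefix)-1, -1, -1): if i <= threshold: break; ...
def pvScanB (pref : List Char) (threshold : Int) : Nat → (Int × Int) → (Int × Int)
  | 0, st => st
  | i + 1, st =>
      if (i : Int) ≤ threshold then st
      else pvScanB pref threshold i (pvStepB st pref i)

def truncate_code_snippet_py_alt (code : String) (max_length : Int) : String :=
  if code = "" then ""
  else if PySem.Str.len code ≤ max_length then code
  else
    let pref := PySem.Str.slice code none (some max_length)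
    let threshold := max_length - 20
    let st := pvScanB pref.toList threshold pref.toList.length
                ((pvRankDict.items.length : Int), (pref.toList.length : Int))
    let truncated := PySem.Str.slice code none (some st.2)
    if PySem.Str.len code > PySem.Str.len truncated then truncated ++ "..." else truncated

-- ===== PRECONDITION & SPEC =====
-- On inputs where code is longer than max_length, max_length is at most 18 and the
-- truncated prefix is nonempty but contains no space, the rfind sentinel of A
-- (minus one) passes the near-the-end threshold test, so A truncates the snippet to
-- the empty string and returns only the three-dot ellipsis; B cuts at the best
-- boundary actually present (or keeps the prefix) and returns it followed by the
-- ellipsis, which is the intended truncation.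
def D_truncate_code_snippet_py (code : String) (max_length : Int) : Prop :=
  code ≠ "" ∧ max_length < PySem.Str.len code ∧ max_length ≤ 18 ∧
  PySem.Str.slice code none (some max_length) ≠ "" ∧
  PySem.Str.isIn " " (PySem.Str.slice code none (some max_length)) = false
instance (code : String) (max_length : Int) : Decidable (D_truncate_code_snippet_py code max_length) := by
  unfold D_truncate_code_snippet_py; infer_instance

def Spec_truncate_code_snippet_py (code : String) (max_length : Int) (out : String) : Prop :=
  ¬ D_truncate_code_snippet_py code max_length → out = truncate_code_snippet_py_alt code max_length
instance (code : String) (max_length : Int) (out : String) : Decidable (Spec_truncate_code_snippet_py code max_length out) := by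
  unfold Spec_truncate_code_snippet_py; infer_instance

def pvDiffWitness_truncate_code_snippet_py : String × Int := ("abcdef", 3)
def pvDiffWitnessOut_truncate_code_snippet_py : String × String := ("...", "abc...")

-- ===== CLAIM (what is proved, stated in full; the proofs are below) =====
def Claim_unchanged_truncate_code_snippet_py : Prop := ∀ (code : String) (max_length : Int), Dom_truncate_code_snippet_py code max_length → Spec_truncate_code_snippet_py code max_length (truncate_code_snippet_py code max_length)
def Claim_changed_truncate_code_snippet_py : Prop := Dom_truncate_code_snippet_py (pvDiffWitness_truncate_code_snippet_py.1) (pvDiffWitness_truncate_code_snippet_py.2) ∧ D_truncate_code_snippet_py (pvDiffWitness_truncate_code_snippet_py.1) (pvDiffWitness_truncate_code_snippet_py.2) ∧ truncate_code_snippet_py (pvDiffWitness_truncate_code_snippet_py.1) (pvDiffWitness_truncate_code_snippet_py.2) = pvDiffWitnessOut_truncate_code_snippet_py.1 ∧ truncate_code_snippet_py_alt (pvDiffWitness_truncate_code_snippet_py.1) (pvDiffWitness_truncate_code_snippet_py.2) = pvDiffWitnessOut_truncate_code_snippet_py.2 ∧ pvDiffWitnessOut_truncate_code_snippet_py.1 ≠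 pvDiffWitnessOut_truncate_code_snippet_py.2
def Claim_exact_truncate_code_snippet_py : Prop := ∀ (code : String) (max_length : Int), Dom_truncate_code_snippet_py code max_length → D_truncate_code_snippet_py code max_length → truncate_code_snippet_py code max_length ≠ truncate_code_snippet_py_alt code max_length

-- ===== LEMMAS AND PROOFS =====

-- the boundary characters, in priority order (A's strings are exactly these, as 1-char strings)
def pvBChars : List Char := [' ', '"', '\'', '=', ':', ';', ',', ')', '}', ']']

-- rank of prefix[i] (what pvStepB consults at index i)
def pvRkAt (l : List Char) (i : Nat) : Option Int := (l[i]?).bind pvRankDict.get?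

-- the qualifying window indices, right to left
def pvQs (l : List Char) (t : Int) : List Nat :=
  ((List.range l.length).reverse).filter (fun i => decide (t < (i : Int)))

-- closed form of the rank dict
def pvRankFn (c : Char) : Option Int :=
  if c = ' ' then some 0 else if c = '"' then some 1 else if c = '\'' then some 2
  else if c = '=' then some 3 else if c = ':' then some 4 else if c = ';' then some 5
  else if c = ',' then some 6 else if c = ')' then some 7 else if c = '}' then some 8
  else if c = ']' then some 9 else none

lemma pvRank_get (c : Char) : pvRankDict.get? c = pvRankFn c := by
  have h : pvRankDict.items = [(' ',0),('"',1),('\'',2),('=',3),(':',4),(';',5),(',',6),(')',7),('}',8),(']',9)] := by decide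
  simp only [PySem.Dict.get?, h, List.find?, pvRankFn]
  by_cases h0 : c = ' '
  · simp [h0]
  · have b0 : (' ' == c) = false := by simp; exact fun e => h0 e.symm
    simp only [b0, if_neg h0]
    by_cases h1 : c = '"'
    · simp [h1]
    · have b1 : ('"' == c) = false := by simp; exact fun e => h1 e.symm
      simp only [b1, if_neg h1]
      by_cases h2 : c = '\''
      · simp [h2]
      · have b2 : ('\'' == c) = false := by simp; exact fun e => h2 e.symm
        simp only [b2, if_neg h2]
        by_cases h3 : c = '='
        · simp [h3]
        · have b3 : ('=' == c) = false := by simp; exact fun e => h3 e.symm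
          simp only [b3, if_neg h3]
          by_cases h4 : c = ':'
          · simp [h4]
          · have b4 : (':' == c) = false := by simp; exact fun e => h4 e.symm
            simp only [b4, if_neg h4]
            by_cases h5 : c = ';'
            · simp [h5]
            · have b5 : (';' == c) = false := by simp; exact fun e => h5 e.symm
              simp only [b5, if_neg h5]
              by_cases h6 : c = ','
              · simp [h6]
              · have b6 : (',' == c) = false := by simp; exact fun e => h6 e.symm
                simp only [b6, if_neg h6]
                by_cases h7 : c = ')'
                · simp [h7]
                · have b7 : (')' == c) = false := by simp; exact fun e => h7 e.symm
                  simp only [b7, if_neg h7]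
                  by_cases h8 : c = '}'
                  · simp [h8]
                  · have b8 : ('}' == c) = false := by simp; exact fun e => h8 e.symm
                    simp only [b8, if_neg h8]
                    by_cases h9 : c = ']'
                    · simp [h9]
                    · have b9 : (']' == c) = false := by simp; exact fun e => h9 e.symm
                      simp only [b9, if_neg h9]
                      rfl

lemma pvRank_mem {c : Char} {r : Int} (h : pvRankDict.get? c = some r) :
    (c, r) ∈ [(' ', (0:Int)), ('"', 1), ('\'', 2), ('=', 3), (':', 4), (';', 5),
               (',', 6), (')', 7), ('}', 8), (']', 9)] := by
  rw [pvRank_get] at h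
  unfold pvRankFn at h
  split_ifs at h with h0 h1 h2 h3 h4 h5 h6 h7 h8 h9 <;>
    simp_all

lemma pvRank_bounds {c : Char} {r : Int} (h : pvRankDict.get? c = some r) : 0 ≤ r ∧ r ≤ 9 := by
  have := pvRank_mem h
  simp only [List.mem_cons, List.not_mem_nil, or_false, Prod.mk.injEq] at this
  rcases this with ⟨_,h⟩|⟨_,h⟩|⟨_,h⟩|⟨_,h⟩|⟨_,h⟩|⟨_,h⟩|⟨_,h⟩|⟨_,h⟩|⟨_,h⟩|⟨_,h⟩ <;> omega

lemma pvRank_inj {c c' : Char} {r : Int} (h : pvRankDict.get? c = some r)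
    (h' : pvRankDict.get? c' = some r) : c = c' := by
  have m1 := pvRank_mem h
  have m2 := pvRank_mem h'
  simp only [List.mem_cons, List.not_mem_nil, or_false, Prod.mk.injEq] at m1 m2
  rcases m1 with ⟨e,h⟩|⟨e,h⟩|⟨e,h⟩|⟨e,h⟩|⟨e,h⟩|⟨e,h⟩|⟨e,h⟩|⟨e,h⟩|⟨e,h⟩|⟨e,h⟩ <;> subst h <;>
  rcases m2 with ⟨e',h'⟩|⟨e',h'⟩|⟨e',h'⟩|⟨e',h'⟩|⟨e',h'⟩|⟨e',h'⟩|⟨e',h'⟩|⟨e',h'⟩|⟨e',h'⟩|⟨e',h'⟩ <;>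
    first | (subst e; subst e'; rfl) | omega

-- rfind of a single character, as find? over the reversed index range
lemma pvPrefix_single (l : List Char) (c : Char) :
    ([c].isPrefixOf l) = (l[0]? == some c) := by
  cases l with
  | nil => rfl
  | cons a t =>
      simp only [List.isPrefixOf, List.isPrefixOf_nil_left, Bool.and_true, List.getElem?_cons_zero]
      by_cases h : c = a
      · simp [h]
      · simp [h, beq_iff_eq, Ne.symm h, fun e : a = c => h e.symm]

lemma pvGo_spec (l : List Char) (c : Char) :
    ∀ m, m ≤ l.length →
      PySem.Chars.rfind.go l [c] m
        = (match (List.range (m+1)).reverse.find? (fun i => l[i]? == some c) with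
           | some i => (i : Int) | none => -1) := by
  intro m
  induction m with
  | zero =>
      intro _
      show (if [c].isPrefixOf l then (0:Int) else -1) = _
      rw [pvPrefix_single]
      simp only [List.range_succ, List.range_zero, List.nil_append, List.reverse_cons,
        List.reverse_nil, List.find?]
      cases h : (l[0]? == some c) <;> simp [h]
  | succ m ih =>
      intro hm
      have hm' : m ≤ l.length := Nat.le_of_succ_le hm
      show (if [c].isPrefixOf (List.drop (m+1) l) then ((m:Int)+1) else PySem.Chars.rfind.go l [c] m) = _
      rw [pvPrefix_single, List.getElem?_drop, Nat.add_zero]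
      rw [show List.range (m+1+1) = List.range (m+1) ++ [m+1] from List.range_succ]
      simp only [List.reverse_append, List.reverse_cons, List.reverse_nil, List.nil_append,
        List.cons_append, List.find?]
      cases h : (l[m+1]? == some c) with
      | true => simp [h]
      | false => simp only [if_neg (Bool.false_ne_true)]; rw [ih hm']

lemma pvRfind_find (l : List Char) (c : Char) :
    PySem.Chars.rfind l [c]
      = (match (List.range l.length).reverse.find? (fun i => l[i]? == some c) with
         | some i => (i : Int) | none => -1) := by
  show PySem.Chars.rfind.go l [c] l.length = _
  cases l with
  | nil => rfl
  | cons a t =>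
      have hlen : (a :: t).length = t.length + 1 := rfl
      rw [hlen]
      show (if [c].isPrefixOf (List.drop (t.length+1) (a::t)) then ((t.length:Int)+1)
            else PySem.Chars.rfind.go (a::t) [c] t.length) = _
      rw [pvPrefix_single, List.getElem?_drop, Nat.add_zero]
      have : (a::t)[t.length+1]? = none := by
        rw [List.getElem?_eq_none_iff]; simp
      rw [this]
      have hcond : ((none : Option Char) == some c) = false := rfl
      rw [hcond, if_neg Bool.false_ne_true]
      rw [pvGo_spec (a::t) c t.length (by simp)]

lemma pvRfind_none {l : List Char} {c : Char} (hc : c ∉ l) : PySem.Chars.rfind l [c] = -1 := by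
  rw [pvRfind_find]
  have : (List.range l.length).reverse.find? (fun i => l[i]? == some c) = none := by
    rw [List.find?_eq_none]
    intro i _
    simp only [beq_iff_eq]
    intro h
    exact hc (List.mem_of_getElem? h)
  rw [this]

lemma pvRfind_some {l : List Char} {c : Char} (hc : c ∈ l) :
    ∃ i0 : Nat, PySem.Chars.rfind l [c] = (i0 : Int) ∧ i0 < l.length ∧ l[i0]? = some c ∧
      ∀ j : Nat, i0 < j → l[j]? ≠ some c := by
  rw [pvRfind_find]
  have hpw : (List.range l.length).reverse.Pairwise (fun a b : Nat => b < a) :=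
    List.pairwise_reverse.mpr List.pairwise_lt_range
  cases hf : (List.range l.length).reverse.find? (fun i => l[i]? == some c) with
  | none =>
      exfalso
      rw [List.find?_eq_none] at hf
      obtain ⟨i, hi, he⟩ := List.mem_iff_getElem.mp hc
      have hge : l[i]? = some c := by rw [List.getElem?_eq_getElem hi, he]
      exact absurd (by simpa using hge : (l[i]? == some c) = true)
        (by simpa using hf i (by simp [hi]))
  | some i0 =>
      refine ⟨i0, rfl, ?_, ?_, ?_⟩
      · have := List.mem_of_find?_eq_some hf
        simp only [List.mem_reverse, List.mem_range] at this
        exact this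
      · have := List.find?_some hf
        simpa using this
      · intro j hj hje
        rcases List.find?_eq_some_iff_append.mp hf with ⟨_, as, bs, hsplit, hfail⟩
        have hjmem : j ∈ (List.range l.length).reverse := by
          simp only [List.mem_reverse, List.mem_range]
          exact (List.getElem?_eq_some_iff.mp hje).1
        rw [hsplit] at hjmem hpw
        rcases List.mem_append.mp hjmem with hj1 | hj2
        · exact absurd (by simpa using hje : (fun i => l[i]? == some c) j = true)
            (by simpa using hfail j hj1)
        · rcases List.mem_cons.mp hj2 with rfl | hj3
          · omega
          · have := (List.pairwise_append.mp hpw).2.1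
            have := (List.pairwise_cons.mp this).1 j hj3
            omega

lemma pvRfind_ge {l : List Char} {c : Char} {j : Nat} (h : l[j]? = some c) :
    (j : Int) ≤ PySem.Chars.rfind l [c] := by
  obtain ⟨i0, he, _, _, hmax⟩ := pvRfind_some (List.mem_of_getElem? h)
  rw [he]
  by_contra hlt
  exact hmax j (by omega) h

-- window membership and order
lemma pvMem_qs {l : List Char} {t : Int} {i : Nat} :
    i ∈ pvQs l t ↔ i < l.length ∧ t < (i : Int) := by
  simp [pvQs]

lemma pvQs_pairwise (l : List Char) (t : Int) : (pvQs l t).Pairwise (fun a b => b < a) :=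
  (List.pairwise_reverse.mpr List.pairwise_lt_range).filter _

-- B's scan is a fold over the qualifying window indices
lemma pvScan_eq_fold (l : List Char) (t : Int) :
    ∀ m st, pvScanB l t m st
      = (((List.range m).reverse).filter (fun i : Nat => decide (t < (i : Int)))).foldl
          (fun st i => pvStepB st l i) st := by
  intro m
  induction m with
  | zero => intro st; rfl
  | succ m ih =>
      intro st
      rw [show List.range (m+1) = List.range m ++ [m] from List.range_succ]
      simp only [List.reverse_append, List.reverse_cons, List.reverse_nil, List.nil_append,
        List.cons_append, List.filter]
      show (if (m : Int) ≤ t then st else pvScanB l t m (pvStepB st l m)) = _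
      by_cases hm : t < (m : Int)
      · rw [if_neg (by omega), decide_eq_true hm, ih]; rfl
      · rw [if_pos (by omega), decide_eq_false hm]
        have : (List.range m).reverse.filter (fun i : Nat => decide (t < (i : Int))) = [] := by
          rw [List.filter_eq_nil_iff]
          intro a ha
          simp only [List.mem_reverse, List.mem_range] at ha
          simp only [decide_eq_true_eq]
          omega
        rw [this]
        rfl

lemma pvStep_rk (st : Int × Int) (l : List Char) (i : Nat) :
    pvStepB st l i = (match pvRkAt l i with
      | some r => if r < st.1 then (r, (i : Int) + 1) else st
      | none => st) := by
  unfold pvStepB pvRkAt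
  cases l[i]? <;> rfl

lemma pvFold_keep (l : List Char) :
    ∀ (L : List Nat) (st : Int × Int),
      (∀ i ∈ L, ∀ r, pvRkAt l i = some r → st.1 ≤ r) →
      L.foldl (fun st i => pvStepB st l i) st = st := by
  intro L
  induction L with
  | nil => intro st _; rfl
  | cons i L ih =>
      intro st h
      simp only [List.foldl_cons]
      have hstep : pvStepB st l i = st := by
        rw [pvStep_rk]
        cases hr : pvRkAt l i with
        | none => rfl
        | some r =>
            have := h i (List.mem_cons_self) r hr
            simp [if_neg (by omega : ¬ r < st.1)]
      rw [hstep]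
      exact ih st (fun j hj => h j (List.mem_cons_of_mem _ hj))

lemma pvFold_pick (l : List Char) (k : Int) :
    ∀ (L : List Nat) (st : Int × Int), L.Pairwise (fun a b => b < a) →
      (∀ i ∈ L, ∀ r, pvRkAt l i = some r → k ≤ r) →
      ∀ i0, i0 ∈ L → pvRkAt l i0 = some k →
      (∀ i ∈ L, i0 < i → pvRkAt l i ≠ some k) →
      k < st.1 →
      L.foldl (fun st i => pvStepB st l i) st = (k, (i0 : Int) + 1) := by
  intro L
  induction L with
  | nil => intro st _ _ i0 h0; exact absurd h0 (List.not_mem_nil)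
  | cons i L ih =>
      intro st hpw hlow i0 hmem hrk hmax hst
      simp only [List.foldl_cons]
      rcases List.mem_cons.mp hmem with rfl | hmem'
      · -- head is i0: update, then keep
        have hstep : pvStepB st l i0 = (k, (i0 : Int) + 1) := by
          rw [pvStep_rk, hrk]; simp [hst]
        rw [hstep]
        exact pvFold_keep l L (k, (i0:Int)+1)
          (fun j hj r hr => by
            have := hlow j (List.mem_cons_of_mem _ hj) r hr
            simpa using this)
      · -- head i ≠ i0 (in fact i > i0)
        have higt : i0 < i := (List.pairwise_cons.mp hpw).1 i0 hmem'
        have hne : pvRkAt l i ≠ some k := hmax i (List.mem_cons_self) higt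
        have hpw' := (List.pairwise_cons.mp hpw).2
        have hlow' : ∀ j ∈ L, ∀ r, pvRkAt l j = some r → k ≤ r :=
          fun j hj => hlow j (List.mem_cons_of_mem _ hj)
        have hmax' : ∀ j ∈ L, i0 < j → pvRkAt l j ≠ some k :=
          fun j hj => hmax j (List.mem_cons_of_mem _ hj)
        rw [pvStep_rk]
        cases hr : pvRkAt l i with
        | none => exact ih st hpw' hlow' i0 hmem' hrk hmax' hst
        | some r =>
            have hkr : k ≤ r := hlow i (List.mem_cons_self) r hr
            have hrgt : k < r := by
              rcases lt_or_eq_of_le hkr with h | h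
              · exact h
              · exact absurd (h ▸ hr) hne
            by_cases hlt : r < st.1
            · simp only [if_pos hlt]
              exact ih ((r, (i:Int)+1)) hpw' hlow' i0 hmem' hrk hmax' (by simpa using hrgt)
            · simp only [if_neg hlt]
              exact ih st hpw' hlow' i0 hmem' hrk hmax' hst

-- the crux: A's priority loop over the remaining boundaries equals B's single-scan result
lemma pvLoop_eq_scan (code : String) (ml : Int) (tr : String)
    (htr : tr = PySem.Str.slice code none (some ml)) :
    ∀ (cs : List Char) (k : Nat), k + cs.length = 10 →
      (∀ (j : Nat) (c : Char), cs[j]? = some c → pvRankDict.get? c = some ((k : Int) + (j : Int))) →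
      (∀ i ∈ pvQs tr.toList (ml - 20), ∀ r, pvRkAt tr.toList i = some r → ¬ r < (k : Int)) →
      (-1 ≤ ml - 20 ∨ (k = 0 ∧ ' ' ∈ tr.toList)) →
      pvLoopA code ml tr (cs.map (fun c => String.ofList [c]))
        = PySem.Str.slice code none
            (some ((pvQs tr.toList (ml - 20)).foldl (fun st i => pvStepB st tr.toList i)
                     ((10 : Int), (tr.toList.length : Int))).2) := by
  intro cs
  induction cs with
  | nil =>
      intro k hk hrank hlow hguard
      have hk10 : k = 10 := by simpa using hk
      subst hk10
      have hfold := pvFold_keep tr.toList (pvQs tr.toList (ml - 20))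
        ((10 : Int), (tr.toList.length : Int))
        (fun i hi r hr => by have := hlow i hi r hr; push_cast at this ⊢; omega)
      rw [List.map_nil]
      show tr = _
      rw [hfold]
      have hml : (0 : Int) ≤ ml := by
        rcases hguard with h | ⟨h10, _⟩
        · omega
        · omega
      -- tr = code[:ml]; code[:len(tr)] is the same string
      have h1 : tr.toList = code.toList.take ml.toNat := by
        rw [htr]; simp [PySem.List.slice_to _ hml]
      apply String.toList_inj.mp
      simp only [PySem.Str.toList_slice, PySem.Chars.slice_eq_listSlice]
      rw [PySem.List.slice_to _ (by positivity)]
      conv_lhs => rw [h1, List.take_eq_take_min]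
      rw [h1]
      congr 1
      simp [List.length_take]
      omega
  | cons c cs' ih =>
      intro k hk hrank hlow hguard
      have hck : pvRankDict.get? c = some (k : Int) := by
        have := hrank 0 c (by simp)
        simpa using this
      rw [List.map_cons]
      show (if PySem.Str.rfind tr (String.ofList [c]) > ml - 20
            then PySem.Str.slice code none (some (PySem.Str.rfind tr (String.ofList [c]) + 1))
            else pvLoopA code ml tr (cs'.map (fun c => String.ofList [c]))) = _
      have hrf : PySem.Str.rfind tr (String.ofList [c]) = PySem.Chars.rfind tr.toList [c] := by
        simp [PySem.Str.rfind_eq]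
      by_cases hb : PySem.Str.rfind tr (String.ofList [c]) > ml - 20
      · rw [if_pos hb]
        -- the boundary c occurs in tr
        have hmem : c ∈ tr.toList := by
          rcases hguard with hg | ⟨hk0, hsp⟩
          · by_contra hnm
            rw [hrf, pvRfind_none hnm] at hb
            omega
          · have hsp0 : pvRankDict.get? ' ' = some ((k : Int)) := by
              subst hk0; decide
            have : c = ' ' := pvRank_inj hck hsp0
            rw [this]; exact hsp
        obtain ⟨i0, hp, hi0lt, hi0c, hi0max⟩ := pvRfind_some hmem
        have hk9 : (k : Int) < 10 := by
          have h10 := hk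
          simp only [List.length_cons] at h10
          omega
        have hfold := pvFold_pick tr.toList ((k : Int)) (pvQs tr.toList (ml - 20))
          ((10 : Int), (tr.toList.length : Int)) (pvQs_pairwise _ _)
          (fun i hi r hr => by have := hlow i hi r hr; omega)
          i0
          (pvMem_qs.mpr ⟨hi0lt, by rw [hrf, hp] at hb; omega⟩)
          (by unfold pvRkAt; rw [hi0c]; simpa using hck)
          (fun i hi higt hrka => by
            rcases Option.bind_eq_some_iff.mp hrka with ⟨ci, hci, hgi⟩
            have : ci = c := pvRank_inj hgi hck
            exact hi0max i higt (this ▸ hci))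
          hk9
        rw [hfold, hrf, hp]
      · rw [if_neg hb]
        have hble : PySem.Chars.rfind tr.toList [c] ≤ ml - 20 := by rw [← hrf]; omega
        have hguard' : -1 ≤ ml - 20 := by
          rcases hguard with hg | ⟨hk0, hsp⟩
          · exact hg
          · have hsp0 : pvRankDict.get? ' ' = some ((k : Int)) := by subst hk0; decide
            have hc' : c = ' ' := pvRank_inj hck hsp0
            obtain ⟨j, hj, he⟩ := List.mem_iff_getElem.mp (hc' ▸ hsp)
            have hge := pvRfind_ge (l := tr.toList) (c := c)
              (j := j) (by rw [List.getElem?_eq_getElem hj, he])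
            omega
        have hrank' : ∀ (j : Nat) (c' : Char), cs'[j]? = some c' →
            pvRankDict.get? c' = some (((k+1 : Nat) : Int) + (j : Int)) := by
          intro j c' hj
          have := hrank (j+1) c' (by simpa using hj)
          rw [this]
          congr 1
          push_cast
          ring
        have hlow' : ∀ i ∈ pvQs tr.toList (ml - 20), ∀ r,
            pvRkAt tr.toList i = some r → ¬ r < ((k+1 : Nat) : Int) := by
          intro i hi r hr hcon
          have hlow0 := hlow i hi r hr
          push_cast at hcon
          have hrk : r = (k : Int) := by omega
          rcases Option.bind_eq_some_iff.mp hr with ⟨ci, hci, hgi⟩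
          have hcic : ci = c := pvRank_inj (hrk ▸ hgi) hck
          have hge := pvRfind_ge (hcic ▸ hci)
          have hqs := (pvMem_qs.mp hi).2
          omega
        exact ih (k+1) (by have := hk; simp only [List.length_cons] at this; omega)
          hrank' hlow' (Or.inl hguard')

-- length of the prefix is below the length of code
lemma pvPref_lt (code : String) (ml : Int) (h1 : code ≠ "") (h2 : ml < PySem.Str.len code) :
    (PySem.Str.slice code none (some ml)).toList.length < code.toList.length := by
  have hne : code.toList ≠ [] := fun h => h1 (String.toList_inj.mp (by simp [h]))
  have hN : 1 ≤ code.toList.length := List.length_pos_of_ne_nil hne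
  rw [PySem.Str.len_eq] at h2
  rw [PySem.Str.toList_slice, PySem.Chars.slice_eq_listSlice, ← PySem.List.slice_zero_start,
      PySem.List.length_slice]
  simp only [PySem.List.clampIdx]
  split_ifs <;> omega

-- B's scan keeps its cut between 1 and the prefix length
lemma pvScan_bounds (l : List Char) (t : Int) :
    ∀ m st, m ≤ l.length → 1 ≤ st.2 → st.2 ≤ (l.length : Int) →
      1 ≤ (pvScanB l t m st).2 ∧ (pvScanB l t m st).2 ≤ (l.length : Int) := by
  intro m
  induction m with
  | zero => intro st _ h1 h2; exact ⟨h1, h2⟩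
  | succ m ih =>
      intro st hm h1 h2
      simp only [pvScanB]
      by_cases hc : (m : Int) ≤ t
      · rw [if_pos hc]; exact ⟨h1, h2⟩
      · rw [if_neg hc]
        have hb : 1 ≤ (pvStepB st l m).2 ∧ (pvStepB st l m).2 ≤ (l.length : Int) := by
          rw [pvStep_rk]
          cases hr : pvRkAt l m with
          | none => exact ⟨h1, h2⟩
          | some r =>
              show 1 ≤ (if r < st.1 then (r, (m:Int)+1) else st).2 ∧
                   (if r < st.1 then (r, (m:Int)+1) else st).2 ≤ (l.length : Int)
              by_cases hlt : r < st.1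
              · rw [if_pos hlt]
                have hm' : m < l.length := by omega
                exact ⟨by simp, by simp; omega⟩
              · rw [if_neg hlt]; exact ⟨h1, h2⟩
        exact ih (pvStepB st l m) (by omega) hb.1 hb.2

-- ===== VERDICT (by name: the statements are the Claim_ definitions above) =====
theorem truncate_code_snippet_py_spec : Claim_unchanged_truncate_code_snippet_py := by
  intro code ml _ hD
  show truncate_code_snippet_py code ml = truncate_code_snippet_py_alt code ml
  unfold truncate_code_snippet_py truncate_code_snippet_py_alt
  by_cases h0 : code = ""
  · simp [h0]
  · rw [if_neg h0, if_neg h0]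
    by_cases h1 : PySem.Str.len code ≤ ml
    · rw [if_pos h1, if_pos h1]
    · rw [if_neg h1, if_neg h1]
      have hlt : ml < PySem.Str.len code := by omega
      simp only [if_pos hlt, show ((pvRankDict.items.length : Int)) = (10:Int) from by decide]
      suffices h : pvLoopA code ml (PySem.Str.slice code none (some ml)) pvBoundaries
          = PySem.Str.slice code none
              (some ((pvScanB (PySem.Str.slice code none (some ml)).toList (ml - 20)
                        (PySem.Str.slice code none (some ml)).toList.length
                        ((10 : Int), ((PySem.Str.slice code none (some ml)).toList.length : Int))).2)) by
        rw [h]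
      set tr := PySem.Str.slice code none (some ml) with htr
      rw [pvScan_eq_fold]
      by_cases hemp : tr.toList = []
      · -- empty prefix: A cuts at rfind(' ') = -1, B scans nothing
        have hml19 : ml < 19 := by
          by_contra hge
          have h19 : (0 : Int) ≤ ml := by omega
          have : tr.toList = code.toList.take ml.toNat := by
            rw [htr]; simp [PySem.List.slice_to _ h19]
          rw [this] at hemp
          have hcode : code.toList ≠ [] := fun h => h0 (String.toList_inj.mp (by simp [h]))
          have : 1 ≤ code.toList.length := List.length_pos_of_ne_nil hcode
          have : ml.toNat = 0 ∨ code.toList.length = 0 := by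
            rcases List.take_eq_nil_iff.mp hemp with h | h
            · exact Or.inl h
            · exact Or.inr (by simp [h])
          omega
        show pvLoopA code ml tr pvBoundaries = _
        rw [hemp]
        simp only [List.length_nil, List.range_zero, List.reverse_nil, List.filter_nil,
          List.foldl_nil]
        show (if PySem.Str.rfind tr " " > ml - 20 then
                PySem.Str.slice code none (some (PySem.Str.rfind tr " " + 1))
              else _) = _
        have hrf : PySem.Str.rfind tr " " = -1 := by
          rw [PySem.Str.rfind_eq, hemp]
          decide
        rw [hrf, if_pos (by omega)]
        norm_num
      · -- nonempty prefix: the crux lemma applies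
        have hD' : 19 ≤ ml ∨ ' ' ∈ tr.toList := by
          by_cases h18 : ml ≤ 18
          · right
            by_cases hsp : PySem.Str.isIn " " tr = true
            · have := (PySem.Str.isIn_iff_infix " " tr).mp hsp
              exact (List.singleton_infix_iff ' ' tr.toList).mp (by simpa using this)
            · exfalso
              apply hD
              refine ⟨h0, hlt, h18, ?_, ?_⟩
              · intro he; exact hemp (by rw [htr, he]; rfl)
              · cases hv : PySem.Str.isIn " " tr
                · rfl
                · exact absurd hv hsp
          · left; omega
        have hrank0 : ∀ (j : Nat) (c : Char), pvBChars[j]? = some c →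
            pvRankDict.get? c = some (((0:Nat) : Int) + (j : Int)) := by
          intro j c hj
          have hjlt : j < 10 := by
            have := (List.getElem?_eq_some_iff.mp hj).1
            simpa [pvBChars] using this
          interval_cases j <;> simp only [pvBChars] at hj <;>
            simp only [List.getElem?_cons_zero, List.getElem?_cons_succ, Option.some.injEq] at hj <;>
            subst hj <;> decide
        have hlow0 : ∀ i ∈ pvQs tr.toList (ml - 20), ∀ r,
            pvRkAt tr.toList i = some r → ¬ r < ((0:Nat) : Int) := by
          intro i _ r hr
          rcases Option.bind_eq_some_iff.mp hr with ⟨ci, _, hgi⟩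
          have := pvRank_bounds hgi
          omega
        have hguard : -1 ≤ ml - 20 ∨ ((0:Nat) = 0 ∧ ' ' ∈ tr.toList) := by
          rcases hD' with h | h
          · exact Or.inl (by omega)
          · exact Or.inr ⟨rfl, h⟩
        have hmap : pvBoundaries = pvBChars.map (fun c => String.ofList [c]) := by decide
        rw [hmap]
        exact pvLoop_eq_scan code ml tr htr pvBChars 0 (by decide) hrank0 hlow0 hguard

theorem truncate_code_snippet_py_changed : Claim_changed_truncate_code_snippet_py := by
  unfold Claim_changed_truncate_code_snippet_py; decide

theorem truncate_code_snippet_py_tight : Claim_exact_truncate_code_snippet_py := by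
  intro code ml _ hD
  unfold D_truncate_code_snippet_py at hD
  obtain ⟨h0, hlt, h18, htrne, hspf⟩ := hD
  have hnm : ' ' ∉ (PySem.Str.slice code none (some ml)).toList := by
    intro hm
    have : PySem.Str.isIn " " (PySem.Str.slice code none (some ml)) = true :=
      (PySem.Str.isIn_iff_infix " " _).mpr
        (by simpa using (List.singleton_infix_iff ' ' _).mpr hm)
    rw [hspf] at this
    exact Bool.false_ne_true this
  have hcode : code.toList ≠ [] := fun h => h0 (String.toList_inj.mp (by simp [h]))
  have hN : 1 ≤ code.toList.length := List.length_pos_of_ne_nil hcode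
  have hn1 : 1 ≤ (PySem.Str.slice code none (some ml)).toList.length :=
    List.length_pos_of_ne_nil (fun h => htrne (String.toList_inj.mp (by simp [h])))
  have hnN : (PySem.Str.slice code none (some ml)).toList.length < code.toList.length :=
    pvPref_lt code ml h0 hlt
  unfold truncate_code_snippet_py truncate_code_snippet_py_alt
  rw [if_neg h0, if_neg h0, if_neg (by omega : ¬ PySem.Str.len code ≤ ml),
    if_neg (by omega : ¬ PySem.Str.len code ≤ ml)]
  simp only [if_pos hlt, show ((pvRankDict.items.length : Int)) = (10:Int) from by decide]
  set tr := PySem.Str.slice code none (some ml) with htr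
  -- A cuts everything: rfind(' ') = -1 passes the test
  have hrfA : PySem.Str.rfind tr " " = -1 := by
    rw [PySem.Str.rfind_eq]
    exact pvRfind_none (by simpa using hnm)
  have hA : pvLoopA code ml tr pvBoundaries = PySem.Str.slice code none (some 0) := by
    show (if PySem.Str.rfind tr " " > ml - 20 then
            PySem.Str.slice code none (some (PySem.Str.rfind tr " " + 1)) else _) = _
    rw [hrfA, if_pos (by omega)]
    norm_num
  have hA0 : PySem.Str.slice code none (some 0) = "" := by
    apply String.toList_inj.mp
    rw [PySem.Str.toList_slice, PySem.Chars.slice_eq_listSlice,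
      PySem.List.slice_to _ (le_refl 0)]
    simp
  rw [hA, hA0]
  rw [if_pos (by have h5 : PySem.Str.len "" = 0 := by decide
                 simp only [h5, gt_iff_lt, PySem.Str.len_eq]; omega)]
  -- B keeps a nonempty cut
  have hb := pvScan_bounds tr.toList (ml - 20) tr.toList.length
    ((10 : Int), (tr.toList.length : Int)) le_rfl (by show (1:Int) ≤ ((tr.toList.length : Int)); exact_mod_cast hn1) le_rfl
  set st := pvScanB tr.toList (ml - 20) tr.toList.length ((10 : Int), (tr.toList.length : Int))
    with hst
  have hlenB : (PySem.Str.slice code none (some st.2)).toList.length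
      = min st.2.toNat code.toList.length := by
    rw [PySem.Str.toList_slice, PySem.Chars.slice_eq_listSlice,
      PySem.List.slice_to _ (by omega : (0:Int) ≤ st.2)]
    simp [List.length_take]
  have hlenB1 : 1 ≤ (PySem.Str.slice code none (some st.2)).toList.length := by
    rw [hlenB]; omega
  have hlenBlt : (PySem.Str.slice code none (some st.2)).toList.length < code.toList.length := by
    rw [hlenB]; omega
  rw [if_pos (by simp only [PySem.Str.len_eq]; omega)]
  intro heq
  have hlen := congrArg (fun s => s.toList.length) heq
  simp only [String.toList_append, List.length_append] at hlen
  have h3 : ("" : String).toList.length = 0 := by decide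
  have h4 : ("..." : String).toList.length = 3 := by decide
  omega
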